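-- pv_equiv track=rewrite | github.com/mathuranika/DSA | uncommonChars.py | uncommonChars
-- ===== SOURCE A (Python) =====
-- def uncommonChars(s1, s2):
--     unsorted = ''
--     for char in s1:
--         if char not in s2:
--               unsorted = unsorted+char
--     for char in s2:
--         if char not in s1:
--               unsorted = unsorted+char
--     sorted_char = sorted(set(unsorted))
--     return "".join(sorted_char)
-- ===== SOURCE B (Python) =====
-- def uncommonChars(s1, s2):
--     return "".join(sorted(set(s1) ^ set(s2)))
-- ===== Notes on version B (the rewrite author's own statement) =====
-- stated objective: faster
-- what changed: Replaces the two per-character scans with 'char in other string' tests (quadratic) by building both character sets once and taking their symmetric difference, then sorting.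
import Mathlib
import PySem

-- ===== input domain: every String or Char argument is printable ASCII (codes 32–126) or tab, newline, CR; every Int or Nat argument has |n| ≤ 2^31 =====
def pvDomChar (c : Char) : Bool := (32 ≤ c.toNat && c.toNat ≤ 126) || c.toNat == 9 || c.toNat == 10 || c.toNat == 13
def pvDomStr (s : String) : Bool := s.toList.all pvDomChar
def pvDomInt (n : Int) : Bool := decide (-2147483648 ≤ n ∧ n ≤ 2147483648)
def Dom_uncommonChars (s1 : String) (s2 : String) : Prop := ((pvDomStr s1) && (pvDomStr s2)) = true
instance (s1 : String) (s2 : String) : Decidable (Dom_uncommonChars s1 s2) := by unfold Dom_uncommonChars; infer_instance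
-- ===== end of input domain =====

-- B replaces A's quadratic per-character membership scans by set symmetric difference, then sorts (faster).


-- ===== PORT A =====
-- 'char not in s2' on a 1-character char is exactly char non-membership in s2's characters.
def uncommonChars (s1 : String) (s2 : String) : String :=
  let unsorted1 := s1.toList.foldl (fun acc c => if c ∉ s2.toList then acc ++ [c] else acc) []
  let unsorted := s2.toList.foldl (fun acc c => if c ∉ s1.toList then acc ++ [c] else acc) unsorted1
  String.ofList (PySem.List.sorted (PySem.Set.ofList unsorted) (fun c => c) false)

-- ===== PORT B =====
def uncommonChars_alt (s1 : String) (s2 : String) : String :=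
  String.ofList (PySem.List.sorted
    (PySem.Set.symmDiff (PySem.Set.ofList s1.toList) (PySem.Set.ofList s2.toList))
    (fun c => c) false)

-- ===== PRECONDITION & SPEC =====
def Spec_uncommonChars (s1 : String) (s2 : String) (out : String) : Prop := out = uncommonChars_alt s1 s2
instance (s1 : String) (s2 : String) (out : String) : Decidable (Spec_uncommonChars s1 s2 out) := by unfold Spec_uncommonChars; infer_instance

-- ===== CLAIM (what is proved, stated in full; the proofs are below) =====
def Claim_equal_uncommonChars : Prop := ∀ (s1 : String) (s2 : String), Dom_uncommonChars s1 s2 → Spec_uncommonChars s1 s2 (uncommonChars s1 s2)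

-- ===== LEMMAS AND PROOFS =====

-- A's deduplicated accumulator and B's symmetric difference are permutations of each other.
lemma uncommon_perm (l1 l2 : List Char) :
    (PySem.Set.ofList (l1.filter (fun c => c ∉ l2) ++ l2.filter (fun c => c ∉ l1))).Perm
      (PySem.Set.symmDiff (PySem.Set.ofList l1) (PySem.Set.ofList l2)) := by
  rw [List.perm_ext_iff_of_nodup (PySem.Set.nodup_ofList _)
    (PySem.Set.nodup_symmDiff _ _ (PySem.Set.nodup_ofList _) (PySem.Set.nodup_ofList _))]
  intro x
  simp [PySem.Set.mem_ofList, PySem.Set.mem_symmDiff, List.mem_append, List.mem_filter]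

-- ===== VERDICT (by name: the statement is the Claim_ definition above) =====
theorem uncommonChars_spec : Claim_equal_uncommonChars := by
  intro s1 s2 _
  unfold Spec_uncommonChars
  simp only [uncommonChars, uncommonChars_alt, PySem.List.foldl_append_ite_eq_filter,
    List.nil_append]
  congr 1
  exact PySem.List.sorted_eq_sorted_of_perm _ _ _ (fun _ _ h => h) (uncommon_perm _ _)
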